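-- pv_equiv track=rewrite | github.com/zulu27/Ada_2026_Tareas | 1_Tarea/cat.py | probar_n
-- ===== SOURCE A (Python) =====
-- def probar_n(k,workers):
--     bottom = 1
--     top = workers
--     while bottom < top:
--         mit = (top + bottom) // 2
--
--         if (mit**k) == workers:
--             bottom = mit
--             top = 0
--
--         elif (mit**k) < workers:
--             bottom = mit + 1
--
--         else:
--             top = mit
--
--     return bottom
-- ===== SOURCE B (Python) =====
-- def probar_n(k, workers):
--     if workers <= 1:
--         return 1
--     if k <= 1:
--         # powers do not outgrow workers before x reaches it: the answer is workers itself
--         return workers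
--     x = 1
--     while x**k < workers:
--         x += 1
--     return x
-- ===== Notes on version B (the rewrite author's own statement) =====
-- stated objective: faster
-- what changed: Replaces the bisection over [bottom, top] with a direct case split (workers <= 1 gives 1, k <= 1 gives workers) plus an incremental scan from x = 1 for the first x with x**k >= workers.
import Mathlib
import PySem

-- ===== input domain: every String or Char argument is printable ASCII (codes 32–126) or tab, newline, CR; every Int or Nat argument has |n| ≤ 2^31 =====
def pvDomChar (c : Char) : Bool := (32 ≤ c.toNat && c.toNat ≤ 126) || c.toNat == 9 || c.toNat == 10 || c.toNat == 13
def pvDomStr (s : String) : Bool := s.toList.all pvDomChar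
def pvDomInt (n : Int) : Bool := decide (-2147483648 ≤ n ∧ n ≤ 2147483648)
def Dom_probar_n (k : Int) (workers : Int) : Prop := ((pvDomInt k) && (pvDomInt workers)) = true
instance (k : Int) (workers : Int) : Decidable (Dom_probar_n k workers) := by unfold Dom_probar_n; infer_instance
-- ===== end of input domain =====

-- B replaces A's interval bisection by a direct case split (workers ≤ 1, k ≤ 1) plus an incremental
-- scan for the first x with x**k ≥ workers; measured faster (B powers only small bases, A powers huge midpoints).

-- ===== PORT A =====
-- models Python's `(m**k) == w` / `(m**k) < w`. Exact on every call the two ports make: both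
-- loops only compare with m ≥ 1 and w ≥ 2, and for k < 0 Python's m**k is a float in (0, 1]
-- (possibly underflowing towards 0.0 but never negative), hence `< w` is true and `== w` false.
def pyPowEq (m k w : Int) : Bool := if 0 ≤ k then m ^ k.toNat == w else false
def pyPowLt (m k w : Int) : Bool := if 0 ≤ k then decide (m ^ k.toNat < w) else true

-- the `while bottom < top` loop of A; the `mit**k == workers` branch sets bottom := mit, top := 0.
-- `fuel` is only a totality guard (each iteration shrinks top - bottom, so the fuel probar_n
-- supplies is never exhausted); it changes no computed value.
def probarLoop (fuel : Nat) (k workers bottom top : Int) : Int :=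
  match fuel with
  | 0 => bottom
  | fuel + 1 =>
    if bottom < top then
      let mit := PySem.Int.floordiv (top + bottom) 2
      if pyPowEq mit k workers then probarLoop fuel k workers mit 0
      else if pyPowLt mit k workers then probarLoop fuel k workers (mit + 1) top
      else probarLoop fuel k workers bottom mit
    else bottom

def probar_n (k : Int) (workers : Int) : Int :=
  probarLoop (workers.toNat + 2) k workers 1 workers

-- ===== PORT B =====
-- the `while x**k < workers` loop of B; `fuel` is again only a totality guard (B only runs
-- this loop with k ≥ 2, workers ≥ 2, where x stays below workers)
def altLoop (fuel : Nat) (k workers x : Int) : Int :=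
  match fuel with
  | 0 => x
  | fuel + 1 =>
    if pyPowLt x k workers then altLoop fuel k workers (x + 1)
    else x

def probar_n_alt (k : Int) (workers : Int) : Int :=
  if workers ≤ 1 then 1
  else if k ≤ 1 then workers
  else altLoop (workers.toNat + 2) k workers 1

-- ===== PRECONDITION & SPEC =====
def Spec_probar_n (k : Int) (workers : Int) (out : Int) : Prop := out = probar_n_alt k workers
instance (k : Int) (workers : Int) (out : Int) : Decidable (Spec_probar_n k workers out) := by unfold Spec_probar_n; infer_instance

-- ===== CLAIM (what is proved, stated in full; the proofs are below) =====
def Claim_equal_probar_n : Prop := ∀ (k : Int) (workers : Int), Dom_probar_n k workers → Spec_probar_n k workers (probar_n k workers)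

-- ===== LEMMAS AND PROOFS =====

-- once `x**k < w` fails it fails for every larger base ≥ 0
lemma pyPowLt_mono {k w a b : Int} (ha : 0 ≤ a) (hab : a ≤ b)
    (hf : pyPowLt a k w = false) : pyPowLt b k w = false := by
  unfold pyPowLt at *
  split at hf
  · rename_i hk
    simp only [hk, if_pos, decide_eq_false_iff_not] at *
    intro hb
    exact hf (lt_of_le_of_lt (pow_le_pow_left₀ ha hab _) hb)
  · simp at hf

-- B's scan, given enough fuel, returns the first x with x**k ≥ w (k ≥ 2, w ≥ 2)
lemma altLoop_props (k w : Int) (hk : 2 ≤ k) (hw : 2 ≤ w) :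
    ∀ (fuel : Nat) (x : Int), 1 ≤ x → x ≤ w → (w - x).toNat + 1 ≤ fuel →
      x ≤ altLoop fuel k w x ∧ altLoop fuel k w x ≤ w ∧
      pyPowLt (altLoop fuel k w x) k w = false ∧
      (∀ y, x ≤ y → y < altLoop fuel k w x → pyPowLt y k w = true) := by
  intro fuel
  induction fuel with
  | zero => intro x hx hxw hf; omega
  | succ fuel ih =>
    intro x hx hxw hf
    rw [altLoop]
    by_cases hlt : pyPowLt x k w = true
    · have hxlt : x ^ k.toNat < w := by
        simpa [pyPowLt, show (0:Int) ≤ k by omega] using hlt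
      have hxp : x ≤ x ^ k.toNat := le_self_pow₀ hx (by omega)
      have hxw' : x < w := by omega
      obtain ⟨ih1, ih2, ih3, ih4⟩ := ih (x + 1) (by omega) (by omega) (by omega)
      refine ⟨by simp [hlt]; omega, by simp [hlt, ih2], by simp [hlt, ih3], ?_⟩
      intro y hxy hy
      simp only [hlt, if_pos] at hy
      rcases eq_or_lt_of_le hxy with rfl | h
      · exact hlt
      · exact ih4 y (by omega) hy
    · have hltf : pyPowLt x k w = false := by simpa using hlt
      simp [hltf]
      exact ⟨hxw, fun y _h1 _h2 => by omega⟩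

-- A's bisection, started on any interval [b, t] that brackets the first x with
-- x = w or x**k ≥ w, converges to exactly that x
lemma probarLoop_eq (k w r : Int) (hw : 2 ≤ w) (hr1 : 1 ≤ r) (_hrw : r ≤ w)
    (hbelow : ∀ y, 1 ≤ y → y < r → pyPowLt y k w = true)
    (hstop : r = w ∨ pyPowLt r k w = false) :
    ∀ (fuel : Nat) (b t : Int), (t - b).toNat + 2 ≤ fuel → 1 ≤ b → t ≤ w →
      b ≤ r → r ≤ t → probarLoop fuel k w b t = r := by
  intro fuel
  induction fuel with
  | zero => intro b t hf; omega
  | succ fuel ih =>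
    intro b t hf hb ht h1 h2
    rw [probarLoop]
    by_cases hbt : b < t
    · simp only [hbt, if_pos]
      set mit := PySem.Int.floordiv (t + b) 2 with hmit
      have hfm := PySem.Int.floordiv_mul_add_mod (t + b) 2
      have h0 := PySem.Int.mod_nonneg (t + b) (by norm_num : (0:Int) < 2)
      have hml := PySem.Int.mod_lt (t + b) (by norm_num : (0:Int) < 2)
      have hmb : b ≤ mit := by rw [hmit]; omega
      have hmt : mit < t := by rw [hmit]; omega
      by_cases heq : pyPowEq mit k w = true
      · -- mit**k == w : A returns mit, and mit must be r
        have hk : 0 ≤ k := by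
          by_contra hk; simp [pyPowEq, hk] at heq
        have hpow : mit ^ k.toNat = w := by
          simpa [pyPowEq, hk] using heq
        have hkn : k.toNat ≠ 0 := by
          intro h; rw [h, pow_zero] at hpow; omega
        have hmr : mit = r := by
          rcases lt_trichotomy mit r with h | h | h
          · have := hbelow mit (by omega) h
            simp only [pyPowLt, hk, if_pos, decide_eq_true_eq] at this
            omega
          · exact h
          · -- r < mit : r already satisfies r**k ≥ w, contradicting strict monotonicity
            have hlt : pyPowLt r k w = false := by
              rcases hstop with hrw' | hf'
              · omega
              · exact hf'
            simp only [pyPowLt, hk, if_pos, decide_eq_false_iff_not, not_lt] at hlt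
            have : r ^ k.toNat < mit ^ k.toNat := pow_lt_pow_left₀ h (by omega) hkn
            omega
        simp only [heq, if_pos]
        cases fuel with
        | zero => omega
        | succ fuel' =>
          rw [probarLoop]
          have : ¬ (mit < (0:Int)) := by omega
          simp only [this]
          exact hmr
      · simp only [heq, if_neg, Bool.not_eq_true]
        rw [Bool.not_eq_true] at heq
        by_cases hlt : pyPowLt mit k w = true
        · -- mit**k < w : the answer is above mit
          have hmr : mit + 1 ≤ r := by
            by_contra hc
            have hrm : r ≤ mit := by omega
            have hrf : pyPowLt r k w = false := by
              rcases hstop with hrw' | hf'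
              · omega
              · exact hf'
            have := pyPowLt_mono (by omega) hrm hrf
            simp [this] at hlt
          simp only [hlt, if_pos]
          exact ih (mit + 1) t (by omega) (by omega) ht hmr h2
        · -- mit**k >= w : the answer is at most mit
          have hltf : pyPowLt mit k w = false := by simpa using hlt
          have hmr : r ≤ mit := by
            by_contra hc
            have := hbelow mit (by omega) (by omega)
            simp [this] at hltf
          simp only [hltf, Bool.false_eq_true]
          exact ih b mit (by omega) hb (by omega) h1 hmr
    · rw [if_neg hbt]
      omega

-- for k ≤ 1 every candidate below w satisfies `x**k < w`
lemma pyPowLt_of_le_one {k w y : Int} (hk : k ≤ 1) (hy : 1 ≤ y) (hyw : y < w)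
    (_hw : 2 ≤ w) : pyPowLt y k w = true := by
  unfold pyPowLt
  by_cases h0 : 0 ≤ k
  · have : k = 0 ∨ k = 1 := by omega
    rcases this with rfl | rfl
    · simp; omega
    · simp; omega
  · simp [h0]

-- ===== VERDICT (by name: the statement is the Claim_ definition above) =====
theorem probar_n_spec : Claim_equal_probar_n := by
  intro k w _
  unfold Spec_probar_n probar_n probar_n_alt
  by_cases hw : 2 ≤ w
  · have hw1 : ¬ (w ≤ 1) := by omega
    by_cases hk : k ≤ 1
    · -- k ≤ 1 : the bisection drifts up to w, B returns w directly
      simp only [hw1, hk, if_pos]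
      exact probarLoop_eq k w w hw (by omega) (le_refl w)
        (fun y hy hyw => pyPowLt_of_le_one hk hy hyw hw)
        (Or.inl rfl) (w.toNat + 2) 1 w (by omega) (le_refl 1) (le_refl w)
        (by omega) (le_refl w)
    · -- k ≥ 2 : both find the first x with x**k ≥ w
      simp only [hw1, hk]
      obtain ⟨ha1, ha2, ha3, ha4⟩ :=
        altLoop_props k w (by omega) hw (w.toNat + 2) 1 (le_refl 1) (by omega) (by omega)
      exact probarLoop_eq k w (altLoop (w.toNat + 2) k w 1) hw ha1 ha2
        (fun y hy hyr => ha4 y hy hyr) (Or.inr ha3)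
        (w.toNat + 2) 1 w (by omega) (le_refl 1) (le_refl w) ha1 ha2
  · -- workers ≤ 1 : A's loop is never entered, B returns 1 directly
    rw [probarLoop]
    have h1 : ¬ ((1:Int) < w) := by omega
    have h2 : w ≤ 1 := by omega
    simp [h1, h2]
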